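-- pv_equiv track=rewrite | github.com/miliar/Code_Jam_Webscraper | Solutions_in_python/Problem_59/1b.py | process
-- ===== SOURCE A (Python) =====
-- def include(ex, new):
-- 	i = 0
-- 	for pos in range(min(len(new), len(ex))):
-- 		if new[pos] == ex[pos]:
-- 			i += 1
-- 		else:
-- 			break
--
-- 	return i
--
-- def process(exist, create):
-- 	mkdir = 0
-- 	for path in create:
-- 		ma = 0
-- 		for ex in exist:
-- 			ma = max(ma, include(ex, path))
-- 		if ma < len(path):
-- 			mkdir += len(path) - ma
-- 		for i in range(ma, len(path)):
-- 			exist += [path]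
-- 	return mkdir
-- ===== SOURCE B (Python) =====
-- def process(exist, create):
--     pref = set()
--     for ex in exist:
--         t = ()
--         for comp in ex:
--             t = t + (comp,)
--             pref.add(t)
--     mkdir = 0
--     for path in create:
--         t = ()
--         for comp in path:
--             t = t + (comp,)
--             if t not in pref:
--                 mkdir += 1
--                 pref.add(t)
--     return mkdir
-- ===== Notes on version B (the rewrite author's own statement) =====
-- stated objective: faster
-- what changed: B keeps one hash set of all existing directory prefixes and counts each missing prefix of each new path once, instead of A's rescanning of the whole (ever-growing, duplicated) exist list to find the best common prefix per path.
import Mathlib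
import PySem

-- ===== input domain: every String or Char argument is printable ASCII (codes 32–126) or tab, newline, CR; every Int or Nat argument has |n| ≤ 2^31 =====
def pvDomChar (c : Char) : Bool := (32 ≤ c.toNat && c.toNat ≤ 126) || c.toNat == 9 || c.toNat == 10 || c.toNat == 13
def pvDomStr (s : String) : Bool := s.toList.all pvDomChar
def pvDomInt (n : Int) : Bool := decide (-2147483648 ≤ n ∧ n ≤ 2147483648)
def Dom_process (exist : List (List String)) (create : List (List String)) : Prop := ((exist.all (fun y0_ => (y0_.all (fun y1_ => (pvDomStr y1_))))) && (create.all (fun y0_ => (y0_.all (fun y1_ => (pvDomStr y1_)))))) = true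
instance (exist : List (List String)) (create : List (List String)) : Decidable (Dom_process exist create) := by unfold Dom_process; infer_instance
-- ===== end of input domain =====

-- B replaces A's per-path rescans of the ever-growing exist list by one set of all
-- existing directory prefixes, counting each missing prefix once (objective: faster).
-- Python A mutates `exist` in place (`exist += [path]`), B does not; the equivalence
-- proved here is about the return value only.

-- ===== PORT A =====
-- include(ex, new): common-prefix loop with break
def includeFn : List String → List String → Nat
  | _, [] => 0
  | [], _ => 0
  | e :: es, n :: ns => if n == e then includeFn es ns + 1 else 0

def processLoop : List (List String) → List (List String) → Int → Int
  | _, [], mkdir => mkdir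
  | exist, path :: rest, mkdir =>
    let ma := exist.foldl (fun m ex => max m (includeFn ex path)) 0
    let mkdir' := if ma < path.length then mkdir + ((path.length : Int) - (ma : Int)) else mkdir
    -- `for i in range(ma, len(path)): exist += [path]` appends path (len-ma) times
    processLoop (exist ++ List.replicate (path.length - ma) path) rest mkdir'

def process (exist : List (List String)) (create : List (List String)) : Int :=
  processLoop exist create 0

-- ===== PORT B =====
-- inner loop of the first pass: extend t by comp, add t to the set
def stepP (q : List String × PySem.Set (List String)) (comp : String) :
    List String × PySem.Set (List String) :=
  let t := q.1 ++ [comp]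
  (t, PySem.Set.add q.2 t)

def addPrefs (pref : PySem.Set (List String)) (ex : List String) : PySem.Set (List String) :=
  (ex.foldl stepP (([] : List String), pref)).2

-- inner loop of the second pass: extend t, count and add if missing
def stepB (q : List String × Int × PySem.Set (List String)) (comp : String) :
    List String × Int × PySem.Set (List String) :=
  let t := q.1 ++ [comp]
  if PySem.Set.contains q.2.2 t then (t, q.2.1, q.2.2)
  else (t, q.2.1 + 1, PySem.Set.add q.2.2 t)

def countPath (st : Int × PySem.Set (List String)) (path : List String) :
    Int × PySem.Set (List String) :=
  let r := path.foldl stepB (([] : List String), st.1, st.2)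
  (r.2.1, r.2.2)

def process_alt (exist : List (List String)) (create : List (List String)) : Int :=
  let pref := exist.foldl addPrefs PySem.Set.empty
  (create.foldl countPath ((0 : Int), pref)).1

-- ===== PRECONDITION & SPEC =====
def Spec_process (exist : List (List String)) (create : List (List String)) (out : Int) : Prop := out = process_alt exist create
instance (exist : List (List String)) (create : List (List String)) (out : Int) : Decidable (Spec_process exist create out) := by unfold Spec_process; infer_instance

-- ===== CLAIM (what is proved, stated in full; the proofs are below) =====
def Claim_equal_process : Prop := ∀ (exist : List (List String)) (create : List (List String)), Dom_process exist create → Spec_process exist create (process exist create)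

-- ===== LEMMAS AND PROOFS =====

-- the set holds exactly the nonempty prefixes of members of exist
def GoodSet (pref : List (List String)) (exist : List (List String)) : Prop :=
  ∀ t, t ∈ pref ↔ (t ≠ [] ∧ ∃ ex ∈ exist, t <+: ex)

-- number of nonempty extensions t0 ++ path.take j missing from s
def missing (t0 : List String) : List String → List (List String) → Nat
  | [], _ => 0
  | c :: ls, s => (if t0 ++ [c] ∈ s then 0 else 1) + missing (t0 ++ [c]) ls s

theorem includeFn_le_left : ∀ (ex path : List String), includeFn ex path ≤ path.length
  | _, [] => by cases ‹List String› <;> simp [includeFn]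
  | [], _ :: _ => by simp [includeFn]
  | e :: es, n :: ns => by
      simp only [includeFn]
      split_ifs with h
      · have := includeFn_le_left es ns; simpa using Nat.succ_le_succ this
      · simp

theorem take_includeFn : ∀ (ex path : List String), path.take (includeFn ex path) <+: ex
  | _, [] => by cases ‹List String› <;> simp [includeFn]
  | [], _ :: _ => by simp [includeFn]
  | e :: es, n :: ns => by
      simp only [includeFn]
      split_ifs with h
      · rw [List.take_succ_cons, List.cons_prefix_cons]
        exact ⟨beq_iff_eq.mp h, take_includeFn es ns⟩
      · simp

theorem le_includeFn : ∀ (ex path : List String) (j : Nat), j ≤ path.length → path.take j <+: ex → j ≤ includeFn ex path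
  | [], path, j, hj, hp => by
      rw [List.prefix_nil] at hp
      have h2 : (path.take j).length = 0 := by rw [hp]; rfl
      rw [List.length_take] at h2
      omega
  | _ :: _, [], j, hj, hp => by simp at hj; omega
  | e :: es, n :: ns, 0, hj, hp => by omega
  | e :: es, n :: ns, j + 1, hj, hp => by
      rw [List.take_succ_cons, List.cons_prefix_cons] at hp
      simp only [includeFn, beq_iff_eq, if_pos hp.1]
      have := le_includeFn es ns j (by simpa using hj) hp.2
      omega

theorem foldl_max_ge_init (f : List String → Nat) :
    ∀ (l : List (List String)) (init : Nat), init ≤ l.foldl (fun m a => max m (f a)) init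
  | [], _ => le_refl _
  | a :: l, _ => le_trans (Nat.le_max_left _ (f a)) (foldl_max_ge_init f l _)

theorem foldl_max_ge_mem (f : List String → Nat) :
    ∀ (l : List (List String)) (init : Nat) (a : List String), a ∈ l → f a ≤ l.foldl (fun m a => max m (f a)) init := by
  intro l
  induction l with
  | nil => intro _ a ha; simp at ha
  | cons b l ih =>
      intro init a ha
      rcases List.mem_cons.mp ha with h | h
      · subst h
        exact le_trans (Nat.le_max_right init (f a)) (foldl_max_ge_init f l _)
      · exact ih _ a h

theorem foldl_max_cases (f : List String → Nat) :
    ∀ (l : List (List String)) (init : Nat),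
      l.foldl (fun m a => max m (f a)) init = init ∨ ∃ a ∈ l, l.foldl (fun m a => max m (f a)) init = f a := by
  intro l
  induction l with
  | nil => intro init; exact Or.inl rfl
  | cons b l ih =>
      intro init
      rcases ih (max init (f b)) with h | ⟨a, ha, h⟩
      · rcases max_choice init (f b) with hm | hm
        · exact Or.inl (by simpa [hm] using h)
        · exact Or.inr ⟨b, List.mem_cons_self .., by simpa [hm] using h⟩
      · exact Or.inr ⟨a, List.mem_cons_of_mem _ ha, h⟩

theorem mem_iff_le_ma (pref exist : List (List String)) (path : List String)
    (hg : GoodSet pref exist) (j : Nat) (h1 : 1 ≤ j) (h2 : j ≤ path.length) :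
    (path.take j ∈ pref ↔ j ≤ exist.foldl (fun m ex => max m (includeFn ex path)) 0) := by
  constructor
  · intro hm
    rcases (hg _).mp hm with ⟨_, ex, hex, hp⟩
    exact le_trans (le_includeFn ex path j h2 hp) (foldl_max_ge_mem (fun ex => includeFn ex path) exist 0 ex hex)
  · intro hle
    rcases foldl_max_cases (fun ex => includeFn ex path) exist 0 with hc | ⟨ex, hex, hc⟩
    · omega
    · refine (hg _).mpr ⟨?_, ex, hex, ?_⟩
      · intro h0
        have := congrArg List.length h0
        rw [List.length_take] at this
        simp only [List.length_nil] at this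
        omega
      · have h3 : path.take j <+: path.take (exist.foldl (fun m ex => max m (includeFn ex path)) 0) := by
          rw [show path.take j = (path.take (exist.foldl (fun m ex => max m (includeFn ex path)) 0)).take j by
            rw [List.take_take]; congr 1; omega]
          exact List.take_prefix _ _
        exact h3.trans (by rw [hc]; exact take_includeFn ex path)

theorem countFold (l : List String) :
    ∀ (t0 : List String) (c : Int) (s s0 : PySem.Set (List String)),
    (∀ x : List String, t0.length < x.length → (x ∈ s ↔ x ∈ s0)) →
    (l.foldl stepB (t0, c, s)).2.1 = c + (missing t0 l s0 : Int) ∧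
    (∀ x, x ∈ (l.foldl stepB (t0, c, s)).2.2 ↔
      x ∈ s ∨ ∃ j, 1 ≤ j ∧ j ≤ l.length ∧ x = t0 ++ l.take j) := by
  induction l with
  | nil => intro t0 c s s0 H; constructor
           · simp [missing]
           · intro x; simp
  | cons c0 ls ih =>
      intro t0 c s s0 H
      simp only [List.foldl_cons, stepB]
      have hlen : (t0 ++ [c0]).length = t0.length + 1 := by simp
      have hmem : (t0 ++ [c0] ∈ s) ↔ (t0 ++ [c0] ∈ s0) := H _ (by omega)
      by_cases hc : t0 ++ [c0] ∈ s
      · rw [if_pos (((PySem.Set.contains_iff _ _).mpr hc))]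
        have ih' := ih (t0 ++ [c0]) c s s0 (by intro x hx; exact H x (by omega))
        refine ⟨?_, ?_⟩
        · rw [ih'.1]
          simp only [missing, if_pos (hmem.mp hc)]
          push_cast
          ring
        · intro x
          rw [ih'.2]
          constructor
          · rintro (h | ⟨j, hj1, hj2, rfl⟩)
            · exact Or.inl h
            · exact Or.inr ⟨j + 1, by omega, by simp; omega, by simp [List.take_succ_cons]⟩
          · rintro (h | ⟨j, hj1, hj2, rfl⟩)
            · exact Or.inl h
            · match j, hj1 with
              | 1, _ => exact Or.inl (by simpa using hc)
              | j + 2, _ => exact Or.inr ⟨j + 1, by omega, by simp at hj2 ⊢; omega, by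
                  simp [List.take_succ_cons]⟩
      · rw [if_neg (fun h => hc ((PySem.Set.contains_iff _ _).mp h))]
        have ih' := ih (t0 ++ [c0]) (c + 1) (PySem.Set.add s (t0 ++ [c0])) s0 (by
          intro x hx
          rw [PySem.Set.mem_add]
          constructor
          · rintro (h | rfl)
            · exact (H x (by omega)).mp h
            · exfalso; rw [hlen] at hx; omega
          · intro h; exact Or.inl ((H x (by omega)).mpr h))
        refine ⟨?_, ?_⟩
        · rw [ih'.1]
          simp only [missing, if_neg (fun h => hc (hmem.mpr h))]
          push_cast
          ring
        · intro x
          rw [ih'.2]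
          rw [PySem.Set.mem_add]
          constructor
          · rintro ((h | rfl) | ⟨j, hj1, hj2, rfl⟩)
            · exact Or.inl h
            · exact Or.inr ⟨1, le_refl _, by simp, by simp⟩
            · exact Or.inr ⟨j + 1, by omega, by simp; omega, by simp [List.take_succ_cons]⟩
          · rintro (h | ⟨j, hj1, hj2, rfl⟩)
            · exact Or.inl (Or.inl h)
            · match j, hj1 with
              | 1, _ => exact Or.inl (Or.inr (by simp))
              | j + 2, _ => exact Or.inr ⟨j + 1, by omega, by simp at hj2 ⊢; omega, by
                  simp [List.take_succ_cons]⟩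

theorem missing_eq (l : List String) :
    ∀ (t0 : List String) (s : List (List String)) (m : Nat),
    (∀ j, 1 ≤ j → j ≤ l.length → ((t0 ++ l.take j) ∈ s ↔ t0.length + j ≤ m)) →
    missing t0 l s + min l.length (m - t0.length) = l.length := by
  induction l with
  | nil => intro t0 s m H; simp [missing]
  | cons c ls ih =>
      intro t0 s m H
      have h1 := H 1 (le_refl _) (by simp)
      simp only [List.take_succ_cons, List.take_zero] at h1
      have ih' := ih (t0 ++ [c]) s m (by
        intro j hj1 hj2
        have := H (j + 1) (by omega) (by simpa using hj2)
        simp only [List.take_succ_cons] at this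
        rw [List.append_cons] at this
        simpa [List.length_append, Nat.add_assoc, Nat.add_comm 1 j] using this)
      simp only [missing]
      by_cases hm : t0 ++ [c] ∈ s
      · rw [if_pos hm]
        have hle : t0.length + 1 ≤ m := h1.mp hm
        simp only [List.length_append, List.length_cons] at ih' ⊢
        simp at ih'
        omega
      · rw [if_neg hm]
        have hgt : ¬ (t0.length + 1 ≤ m) := fun h => hm (h1.mpr h)
        simp only [List.length_append, List.length_cons] at ih' ⊢
        simp at ih'
        omega

theorem prefFold (l : List String) :
    ∀ (t0 : List String) (s : PySem.Set (List String)) (x : List String),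
    (x ∈ (l.foldl stepP (t0, s)).2 ↔ x ∈ s ∨ ∃ j, 1 ≤ j ∧ j ≤ l.length ∧ x = t0 ++ l.take j) := by
  induction l with
  | nil => intro t0 s x; simp
  | cons c ls ih =>
      intro t0 s x
      simp only [List.foldl_cons, stepP]
      rw [ih]
      rw [PySem.Set.mem_add]
      constructor
      · rintro ((h | h) | ⟨j, hj1, hj2, rfl⟩)
        · exact Or.inl h
        · exact Or.inr ⟨1, le_refl _, by simp, by simp [h]⟩
        · exact Or.inr ⟨j + 1, by omega, by simp; omega, by
            simp [List.take_succ_cons]⟩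
      · rintro (h | ⟨j, hj1, hj2, rfl⟩)
        · exact Or.inl (Or.inl h)
        · match j, hj1 with
          | 1, _ => exact Or.inl (Or.inr (by simp))
          | j + 2, _ => exact Or.inr ⟨j + 1, by omega, by simp at hj2 ⊢; omega, by
              simp [List.take_succ_cons]⟩

theorem pref_take_iff (x ex : List String) :
    (x ≠ [] ∧ x <+: ex) ↔ ∃ j, 1 ≤ j ∧ j ≤ ex.length ∧ x = ex.take j := by
  constructor
  · rintro ⟨hne, hp⟩
    refine ⟨x.length, ?_, hp.length_le, List.prefix_iff_eq_take.mp hp⟩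
    cases x
    · simp at hne
    · simp
  · rintro ⟨j, hj1, hj2, rfl⟩
    refine ⟨?_, List.take_prefix _ _⟩
    intro h0
    have := congrArg List.length h0
    rw [List.length_take] at this
    simp only [List.length_nil] at this
    omega

theorem buildAux : ∀ (exist : List (List String)) (s : PySem.Set (List String)) (x : List String),
    x ∈ exist.foldl addPrefs s ↔
      x ∈ s ∨ ∃ ex ∈ exist, ∃ j, 1 ≤ j ∧ j ≤ ex.length ∧ x = ex.take j := by
  intro exist
  induction exist with
  | nil => intro s x; simp
  | cons e es ih =>
      intro s x
      simp only [List.foldl_cons]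
      rw [ih]
      have : x ∈ addPrefs s e ↔ x ∈ s ∨ ∃ j, 1 ≤ j ∧ j ≤ e.length ∧ x = e.take j := by
        unfold addPrefs
        rw [prefFold]
        simp
      rw [this]
      constructor
      · rintro ((h | h) | ⟨ex, hex, h⟩)
        · exact Or.inl h
        · exact Or.inr ⟨e, List.mem_cons_self .., h⟩
        · exact Or.inr ⟨ex, List.mem_cons_of_mem _ hex, h⟩
      · rintro (h | ⟨ex, hex, h⟩)
        · exact Or.inl (Or.inl h)
        · rcases List.mem_cons.mp hex with rfl | hex
          · exact Or.inl (Or.inr h)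
          · exact Or.inr ⟨ex, hex, h⟩

theorem build_good : ∀ (exist : List (List String)), GoodSet (exist.foldl addPrefs PySem.Set.empty) exist := by
  intro exist t
  rw [buildAux]
  simp only [PySem.Set.empty, List.not_mem_nil, false_or]
  constructor
  · rintro ⟨ex, hex, h⟩
    rcases (pref_take_iff t ex).mpr h with ⟨hne, hp⟩
    exact ⟨hne, ex, hex, hp⟩
  · rintro ⟨hne, ex, hex, hp⟩
    exact ⟨ex, hex, (pref_take_iff t ex).mp ⟨hne, hp⟩⟩

theorem mainLoop : ∀ (create exist : List (List String)) (pref : PySem.Set (List String)) (mkdir : Int),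
    GoodSet pref exist →
    processLoop exist create mkdir = (create.foldl countPath (mkdir, pref)).1 := by
  intro create
  induction create with
  | nil => intro exist pref mkdir _; rfl
  | cons path rest ih =>
      intro exist pref mkdir hg
      have hstep : processLoop exist (path :: rest) mkdir =
          processLoop (exist ++ List.replicate
              (path.length - exist.foldl (fun m ex => max m (includeFn ex path)) 0) path) rest
            (if exist.foldl (fun m ex => max m (includeFn ex path)) 0 < path.length
             then mkdir + ((path.length : Int) -
               ((exist.foldl (fun m ex => max m (includeFn ex path)) 0 : Nat) : Int))
             else mkdir) := rfl
      set ma := exist.foldl (fun m ex => max m (includeFn ex path)) 0 with hma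
      have hCF := countFold path [] mkdir pref pref (fun x _ => Iff.rfl)
      simp only [List.nil_append] at hCF
      have hma_le : ma ≤ path.length := by
        rcases foldl_max_cases (fun ex => includeFn ex path) exist 0 with h | ⟨ex, _, h⟩
        · rw [hma, h]; omega
        · rw [hma, h]; exact includeFn_le_left ex path
      have hmiss : missing [] path pref + min path.length ma = path.length := by
        have := missing_eq path [] pref ma (by
          intro j hj1 hj2
          simp only [List.nil_append, List.length_nil, Nat.zero_add]
          exact mem_iff_le_ma pref exist path hg j hj1 hj2)
        simpa using this
      have hCP : countPath (mkdir, pref) path =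
          ((path.foldl stepB ([], mkdir, pref)).2.1, (path.foldl stepB ([], mkdir, pref)).2.2) := rfl
      set r := path.foldl stepB (([] : List String), mkdir, pref) with hr
      have hcount : r.2.1 = (if ma < path.length
          then mkdir + ((path.length : Int) - ((ma : Nat) : Int)) else mkdir) := by
        rw [hCF.1]
        by_cases hlt : ma < path.length
        · rw [if_pos hlt]
          have : missing [] path pref = path.length - ma := by omega
          rw [this]
          push_cast [Nat.cast_sub hma_le]
          ring
        · rw [if_neg hlt]
          have : missing [] path pref = 0 := by omega
          rw [this]
          simp
      have hg' : GoodSet r.2.2 (exist ++ List.replicate (path.length - ma) path) := by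
        intro t
        rw [hCF.2 t]
        constructor
        · rintro (h | ⟨j, hj1, hj2, rfl⟩)
          · rcases (hg t).mp h with ⟨hne, ex, hex, hp⟩
            exact ⟨hne, ex, List.mem_append_left _ hex, hp⟩
          · have hne : path.take j ≠ [] := by
              intro h0
              have := congrArg List.length h0
              rw [List.length_take] at this
              simp only [List.length_nil] at this
              omega
            by_cases hlt : ma < path.length
            · exact ⟨hne, path,
                List.mem_append_right _ (List.mem_replicate.mpr ⟨by omega, rfl⟩),
                List.take_prefix _ _⟩
            · have hmem : path.take j ∈ pref :=
                (mem_iff_le_ma pref exist path hg j hj1 hj2).mpr (by omega)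
              rcases (hg _).mp hmem with ⟨_, ex, hex, hp⟩
              exact ⟨hne, ex, List.mem_append_left _ hex, hp⟩
        · rintro ⟨hne, ex, hex, hp⟩
          rcases List.mem_append.mp hex with hex | hex
          · exact Or.inl ((hg t).mpr ⟨hne, ex, hex, hp⟩)
          · rcases List.mem_replicate.mp hex with ⟨-, hexp⟩
            rw [hexp] at hp
            exact Or.inr ((pref_take_iff t path).mp ⟨hne, hp⟩)
      rw [hstep, List.foldl_cons, hCP, ← hcount]
      exact ih _ r.2.2 r.2.1 hg' 

-- ===== VERDICT (by name: the statement is the Claim_ definition above) =====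
theorem process_spec : Claim_equal_process := by
  intro exist create _
  unfold Spec_process process process_alt
  exact mainLoop create exist _ 0 (build_good exist)
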